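-- pv_equiv track=rewrite | github.com/AsithaLKonara/J-tech-License-server | apps/upload-bridge/tests/verification/verify_all_16_wiring_combinations.py | _generate_design_pixels
-- ===== SOURCE A (Python) =====
-- from typing import Dict, Iterable, List, Tuple
--
-- def _generate_design_pixels(width: int, height: int) -> List[Tuple[int, int, int]]:
--     """
--     Create a deterministic set of RGB tuples where each LED position maps to a
--     unique color. We encode the LED index directly in the RGB components so that
--     even very large matrices remain collision-free.
--     """
--     total_leds = width * height
--     pixels: List[Tuple[int, int, int]] = []
--     for idx in range(total_leds):
--         r = (idx >> 16) & 0xFF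
--         g = (idx >> 8) & 0xFF
--         b = idx & 0xFF
--         pixels.append((r, g, b))
--     return pixels
-- ===== SOURCE B (Python) =====
-- from typing import Dict, Iterable, List, Tuple
--
-- def _generate_design_pixels(width: int, height: int) -> List[Tuple[int, int, int]]:
--     # Incremental odometer counter instead of recomputing from the index.
--     total_leds = width * height
--     pixels: List[Tuple[int, int, int]] = []
--     r = g = b = 0
--     for _ in range(total_leds):
--         pixels.append((r, g, b))
--         b += 1
--         if b == 256:
--             b = 0
--             g += 1
--             if g == 256:
--                 g = 0
--                 r += 1
--                 if r == 256:
--                     r = 0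
--     return pixels
-- ===== Notes on version B (the rewrite author's own statement) =====
-- stated objective: alternative
-- what changed: Replaces per-index recomputation via bit-shifts/masks with an incremental carry (odometer) counter maintaining a running (r,g,b) state across iterations.
import Mathlib
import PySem

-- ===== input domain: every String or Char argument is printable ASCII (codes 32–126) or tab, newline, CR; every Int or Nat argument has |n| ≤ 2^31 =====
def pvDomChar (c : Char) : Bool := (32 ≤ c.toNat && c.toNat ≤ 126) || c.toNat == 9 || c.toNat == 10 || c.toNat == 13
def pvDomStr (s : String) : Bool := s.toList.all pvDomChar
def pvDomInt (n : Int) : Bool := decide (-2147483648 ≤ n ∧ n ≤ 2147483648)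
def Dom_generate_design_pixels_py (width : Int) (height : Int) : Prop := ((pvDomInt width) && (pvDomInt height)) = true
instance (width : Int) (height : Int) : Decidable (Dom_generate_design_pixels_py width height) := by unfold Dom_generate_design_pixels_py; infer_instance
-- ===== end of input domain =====

-- B replaces A's per-index bit-shift/mask recomputation by an incremental
-- carry (odometer) counter carrying a running (r, g, b) state; alternative
-- decomposition, same asymptotic cost.


-- ===== PORT A =====
-- literal transliteration of A: for idx in range(width*height): append ((idx>>16)&0xFF, (idx>>8)&0xFF, idx&0xFF)
def generate_design_pixels_py (width : Int) (height : Int) : List (Int × Int × Int) :=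
  let total_leds := width * height
  (PySem.List.pyRange 0 total_leds 1).foldl
    (fun (pixels : List (Int × Int × Int)) (idx : Int) =>
      let r := PySem.Int.band (idx >>> (16 : Nat)) 255
      let g := PySem.Int.band (idx >>> (8 : Nat)) 255
      let b := PySem.Int.band idx 255
      pixels ++ [(r, g, b)]) []

-- ===== PORT B =====
-- B's loop: run `n` iterations carrying the odometer state (r, g, b)
def pvAltLoop : Nat → Int → Int → Int → List (Int × Int × Int)
  | 0, _, _, _ => []
  | n + 1, r, g, b =>
    (r, g, b) ::
      (if b + 1 = 256 then
        if g + 1 = 256 then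
          if r + 1 = 256 then pvAltLoop n 0 0 0 else pvAltLoop n (r + 1) 0 0
        else pvAltLoop n r (g + 1) 0
      else pvAltLoop n r g (b + 1))

def generate_design_pixels_py_alt (width : Int) (height : Int) : List (Int × Int × Int) :=
  pvAltLoop (width * height).toNat 0 0 0

-- ===== PRECONDITION & SPEC =====
def Spec_generate_design_pixels_py (width : Int) (height : Int) (out : List (Int × Int × Int)) : Prop := out = generate_design_pixels_py_alt width height
instance (width : Int) (height : Int) (out : List (Int × Int × Int)) : Decidable (Spec_generate_design_pixels_py width height out) := by unfold Spec_generate_design_pixels_py; infer_instance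

-- ===== CLAIM (what is proved, stated in full; the proofs are below) =====
def Claim_equal_generate_design_pixels_py : Prop := ∀ (width : Int) (height : Int), Dom_generate_design_pixels_py width height → Spec_generate_design_pixels_py width height (generate_design_pixels_py width height)

-- ===== LEMMAS AND PROOFS =====

-- canonical value of the pixel at LED index m
def pvPix (m : Nat) : Int × Int × Int :=
  (((m / 65536 % 256 : Nat) : Int), ((m / 256 % 256 : Nat) : Int), ((m % 256 : Nat) : Int))

lemma pvBandShift (k s p : Nat) (hp : (2:Nat) ^ s = p) :
    PySem.Int.band ((k : Int) >>> s) 255 = ((k / p % 256 : Nat) : Int) := by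
  have h1 : ((k : Int) >>> s) = ((k >>> s : Nat) : Int) := by simp
  rw [h1, show (255 : Int) = ((255 : Nat) : Int) from rfl, PySem.Int.band_natCast,
    Nat.shiftRight_eq_div_pow, hp, Nat.and_two_pow_sub_one_eq_mod (k / p) 8]

lemma pvA_eq_map (width height : Int) :
    generate_design_pixels_py width height =
      (List.range (width * height).toNat).map pvPix := by
  unfold generate_design_pixels_py
  rw [PySem.List.foldl_append_singleton_eq_map, PySem.List.pyRange_one]
  simp only [Int.sub_zero, List.map_map]
  refine List.map_congr_left (fun k _ => ?_)
  show (PySem.Int.band ((0 + (k:Int)) >>> (16:Nat)) 255,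
        PySem.Int.band ((0 + (k:Int)) >>> (8:Nat)) 255,
        PySem.Int.band (0 + (k:Int)) 255) = pvPix k
  rw [Int.zero_add]
  have h0 : PySem.Int.band (k : Int) 255 = ((k % 256 : Nat) : Int) := by
    rw [show (255 : Int) = ((255 : Nat) : Int) from rfl, PySem.Int.band_natCast,
      Nat.and_two_pow_sub_one_eq_mod k 8]
  rw [pvBandShift k 16 65536 (by norm_num), pvBandShift k 8 256 (by norm_num), h0, pvPix]

lemma pvAltRun : ∀ (n i : Nat),
    pvAltLoop n ((i / 65536 % 256 : Nat)) ((i / 256 % 256 : Nat)) ((i % 256 : Nat)) =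
      (List.range n).map (fun k => pvPix (i + k)) := by
  intro n
  induction n with
  | zero => intro i; simp [pvAltLoop]
  | succ n ih =>
    intro i
    rw [List.range_succ_eq_map, List.map_cons, List.map_map]
    have htail : (List.range n).map ((fun k => pvPix (i + k)) ∘ Nat.succ) =
        (List.range n).map (fun k => pvPix ((i + 1) + k)) :=
      List.map_congr_left (fun k _ => by
        show pvPix (i + (k + 1)) = pvPix ((i + 1) + k)
        rw [show i + (k + 1) = (i + 1) + k by omega])
    show ((((i / 65536 % 256 : Nat)) : Int), (((i / 256 % 256 : Nat)) : Int),
          (((i % 256 : Nat)) : Int)) ::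
        (if ((i % 256 : Nat) : Int) + 1 = 256 then
          if ((i / 256 % 256 : Nat) : Int) + 1 = 256 then
            if ((i / 65536 % 256 : Nat) : Int) + 1 = 256 then pvAltLoop n 0 0 0
            else pvAltLoop n (((i / 65536 % 256 : Nat) : Int) + 1) 0 0
          else pvAltLoop n ((i / 65536 % 256 : Nat)) (((i / 256 % 256 : Nat) : Int) + 1) 0
        else pvAltLoop n ((i / 65536 % 256 : Nat)) ((i / 256 % 256 : Nat))
          (((i % 256 : Nat) : Int) + 1)) = _
    congr 1
    rw [htail]
    split_ifs with h1 h2 h3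
    · have n1 : (i + 1) / 65536 % 256 = 0 := by omega
      have n2 : (i + 1) / 256 % 256 = 0 := by omega
      have n3 : (i + 1) % 256 = 0 := by omega
      have H := ih (i + 1); rw [n1, n2, n3] at H
      simpa using H
    · have n1 : (i + 1) / 65536 % 256 = i / 65536 % 256 + 1 := by omega
      have n2 : (i + 1) / 256 % 256 = 0 := by omega
      have n3 : (i + 1) % 256 = 0 := by omega
      have H := ih (i + 1); rw [n1, n2, n3] at H
      simpa using H
    · have n1 : (i + 1) / 65536 % 256 = i / 65536 % 256 := by omega
      have n2 : (i + 1) / 256 % 256 = i / 256 % 256 + 1 := by omega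
      have n3 : (i + 1) % 256 = 0 := by omega
      have H := ih (i + 1); rw [n1, n2, n3] at H
      simpa using H
    · have n1 : (i + 1) / 65536 % 256 = i / 65536 % 256 := by omega
      have n2 : (i + 1) / 256 % 256 = i / 256 % 256 := by omega
      have n3 : (i + 1) % 256 = i % 256 + 1 := by omega
      have H := ih (i + 1); rw [n1, n2, n3] at H
      simpa using H

lemma pvB_eq_map (width height : Int) :
    generate_design_pixels_py_alt width height =
      (List.range (width * height).toNat).map pvPix := by
  unfold generate_design_pixels_py_alt
  have h := pvAltRun (width * height).toNat 0
  simp only [Nat.zero_div, Nat.zero_mod, Nat.cast_zero, Nat.zero_add] at h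
  rw [h]

-- ===== VERDICT (by name: the statement is the Claim_ definition above) =====
theorem generate_design_pixels_py_spec : Claim_equal_generate_design_pixels_py := by
  intro width height _
  unfold Spec_generate_design_pixels_py
  rw [pvA_eq_map, pvB_eq_map]
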